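-- pv_equiv track=rewrite | github.com/JustAFloatingHead/KuhanPiirran | Commands.py | potential_cutting_pair_indexes
-- ===== SOURCE A (Python) =====
-- def count(substr,theStr):
--     num = 0
--     for i in range(len(theStr)):
--         if theStr[i:i+len(substr)] == substr:
--             num += 1
--     return num
--
-- def equal_nro_of_parenthesis(string):
--     if count("(",string)==count(")",string):
--         return True
--     else:
--         return False
--
-- def potential_cutting_indexes(string):
--     cutting_indexes=[0]
--     for i in range(1,len(string)):
--         if string[i] in delimiter_list() or string[i] in math_operator_list():
--             cutting_indexes.append(i)
--             #cutting_indexes.append(i+1)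
--         elif string[i] not in delimiter_list()+math_operator_list() and string[i-1] in delimiter_list()+math_operator_list():
--             cutting_indexes.append(i)
--     cutting_indexes.append(len(string))
--     return cutting_indexes
--
-- def potential_cutting_pair_indexes(string):
--     cutting_indexes=potential_cutting_indexes(string)
--     pair_indexes=[]
--     for i in range(len(cutting_indexes)-1):
--         for j in range(i+1,len(cutting_indexes)):
--             if equal_nro_of_parenthesis(string[cutting_indexes[i]:cutting_indexes[j]]):
--                 pair_indexes.append([cutting_indexes[i],cutting_indexes[j]])
--     return pair_indexes
--
-- def math_operator_list():
--     return ["+","*","/","-"]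
--
-- def delimiter_list():
--     return ["(",")",","," "]
-- ===== SOURCE B (Python) =====
-- def potential_cutting_pair_indexes(string):
--     special = set("(), +*/-")
--     cuts = [0] + [i for i in range(1, len(string))
--                   if string[i] in special or string[i - 1] in special] + [len(string)]
--     bal = [0]
--     b = 0
--     for ch in string:
--         b += (ch == '(') - (ch == ')')
--         bal.append(b)
--     return _pairs(cuts, bal)
--
-- def _pairs(cuts, bal):
--     if not cuts:
--         return []
--     a, rest = cuts[0], cuts[1:]
--     return [[a, c] for c in rest if bal[a] == bal[c]] + _pairs(rest, bal)
-- ===== Notes on version B (the rewrite author's own statement) =====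
-- stated objective: faster
-- what changed: B replaces A's per-pair substring counting (which rescans the substring character by character for each of the O(k^2) index pairs) with one prefix-balance array built in a single pass, so each pair is checked in O(1) by comparing two prefix balances; the pair list is produced by a recursion over suffixes of the cut list and the cut list itself by a single merged-condition comprehension.
import Mathlib
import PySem

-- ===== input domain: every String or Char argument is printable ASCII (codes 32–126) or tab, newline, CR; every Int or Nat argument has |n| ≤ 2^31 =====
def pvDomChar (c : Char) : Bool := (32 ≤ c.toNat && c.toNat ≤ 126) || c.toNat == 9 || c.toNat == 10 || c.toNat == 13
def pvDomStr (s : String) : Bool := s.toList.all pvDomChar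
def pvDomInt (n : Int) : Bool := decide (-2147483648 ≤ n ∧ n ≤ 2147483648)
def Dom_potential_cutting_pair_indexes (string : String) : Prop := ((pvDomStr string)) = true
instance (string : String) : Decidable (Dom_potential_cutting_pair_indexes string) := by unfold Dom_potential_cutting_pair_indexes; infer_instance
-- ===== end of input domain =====

-- B builds one prefix-balance array so each pair needs an O(1) comparison instead of A's
-- per-pair substring rescan (objective: faster; timing measured by the check).

-- ===== PORT A =====
def pvCount (substr theStr : String) : Int :=
  (PySem.List.pyRange 0 (PySem.Str.len theStr) 1).foldl
    (fun num i =>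
      if PySem.Str.slice theStr (some i) (some (i + PySem.Str.len substr)) = substr then num + 1 else num) 0

def pvEqualNro (string : String) : Bool :=
  if pvCount "(" string = pvCount ")" string then true else false

def pvMathOperatorList : List Char := ['+', '*', '/', '-']
def pvDelimiterList : List Char := ['(', ')', ',', ' ']

def pvCuttingIndexes (string : String) : List Int :=
  let ci := (PySem.List.pyRange 1 (PySem.Str.len string) 1).foldl
    (fun acc i =>
      if PySem.List.pyGetD string.toList i ' ' ∈ pvDelimiterList ∨
         PySem.List.pyGetD string.toList i ' ' ∈ pvMathOperatorList then acc ++ [i]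
      else if PySem.List.pyGetD string.toList i ' ' ∉ pvDelimiterList ++ pvMathOperatorList ∧
              PySem.List.pyGetD string.toList (i - 1) ' ' ∈ pvDelimiterList ++ pvMathOperatorList then acc ++ [i]
      else acc) [(0 : Int)]
  ci ++ [PySem.Str.len string]

def potential_cutting_pair_indexes (string : String) : List (List Int) :=
  let ci := pvCuttingIndexes string
  (PySem.List.pyRange 0 ((ci.length : Int) - 1) 1).foldl (fun pairs i =>
    (PySem.List.pyRange (i + 1) (ci.length : Int) 1).foldl (fun pairs j =>
      if pvEqualNro (PySem.Str.slice string (some (PySem.List.pyGetD ci i 0)) (some (PySem.List.pyGetD ci j 0)))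
      then pairs ++ [[PySem.List.pyGetD ci i 0, PySem.List.pyGetD ci j 0]]
      else pairs) pairs) []

-- ===== PORT B =====
def pvSpecial : PySem.Set Char := PySem.Set.ofList "(), +*/-".toList

def pvCutsB (string : String) : List Int :=
  [0] ++ (PySem.List.pyRange 1 (PySem.Str.len string) 1).filter
      (fun i => decide (PySem.List.pyGetD string.toList i ' ' ∈ pvSpecial ∨
                        PySem.List.pyGetD string.toList (i - 1) ' ' ∈ pvSpecial))
   ++ [PySem.Str.len string]

def pvBalances (string : String) : List Int :=
  (string.toList.foldl (fun st ch =>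
      let b := st.2 + (if ch = '(' then (1 : Int) else 0) - (if ch = ')' then (1 : Int) else 0)
      (st.1 ++ [b], b)) ([(0 : Int)], (0 : Int))).1

def pvPairs (cuts bal : List Int) : List (List Int) :=
  match cuts with
  | [] => []
  | a :: rest =>
    (rest.filterMap (fun c =>
        if PySem.List.pyGetD bal a 0 = PySem.List.pyGetD bal c 0 then some [a, c] else none))
    ++ pvPairs rest bal

def potential_cutting_pair_indexes_alt (string : String) : List (List Int) :=
  pvPairs (pvCutsB string) (pvBalances string)

-- ===== PRECONDITION & SPEC =====
def Spec_potential_cutting_pair_indexes (string : String) (out : List (List Int)) : Prop := out = potential_cutting_pair_indexes_alt string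
instance (string : String) (out : List (List Int)) : Decidable (Spec_potential_cutting_pair_indexes string out) := by unfold Spec_potential_cutting_pair_indexes; infer_instance

-- ===== CLAIM (what is proved, stated in full; the proofs are below) =====
def Claim_equal_potential_cutting_pair_indexes : Prop := ∀ (string : String), Dom_potential_cutting_pair_indexes string → Spec_potential_cutting_pair_indexes string (potential_cutting_pair_indexes string)

-- ===== LEMMAS AND PROOFS =====

-- balance of a character list: '(' count minus ')' count
def pvBalOf (l : List Char) : Int := (l.count '(' : Int) - (l.count ')' : Int)

-- canonical "all ordered pairs of the cut list passing test P"
def pvPairsOf (P : Int → Int → Bool) : List Int → List (List Int)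
  | [] => []
  | a :: rest => ((rest.filter (fun c => P a c)).map (fun c => [a, c])) ++ pvPairsOf P rest

lemma pvCount_char (c : Char) (cstr : String) (h : cstr.toList = [c]) (t : String) :
    pvCount cstr t = ((t.toList.count c : Nat) : Int) := by
  unfold pvCount
  have hlen1 : PySem.Str.len cstr = 1 := by
    rw [PySem.Str.len_eq, h]; rfl
  have hlent : PySem.Str.len t = (t.toList.length : Int) := PySem.Str.len_eq t
  rw [hlen1, hlent]
  have hbody : ∀ (num : Int) (i : Int), i ∈ PySem.List.pyRange 0 (t.toList.length : Int) 1 →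
      (if PySem.Str.slice t (some i) (some (i + 1)) = cstr then num + 1 else num)
      = (if PySem.List.pyGetD t.toList i ' ' = c then num + 1 else num) := by
    intro num i hi
    rcases (PySem.List.mem_pyRange_one).mp hi with ⟨h0, hlt⟩
    have hslice : (PySem.Str.slice t (some i) (some (i + 1))).toList
        = [t.toList[i.toNat]'(by omega)] := by
      have hk : i.toNat < t.toList.length := by omega
      have hb : (PySem.Str.slice t (some i) (some (i + 1))).toList
          = PySem.List.slice t.toList (some i) (some (i + 1)) := by simp
      have h1 : (i + 1).toNat - i.toNat = 1 := by omega
      rw [hb, PySem.List.slice_toNat _ h0 (by omega), h1, List.drop_eq_getElem_cons hk]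
      rfl
    have hiff : (PySem.Str.slice t (some i) (some (i + 1)) = cstr)
        ↔ (PySem.List.pyGetD t.toList i ' ' = c) := by
      rw [← String.toList_inj, hslice, h,
        PySem.List.pyGetD_eq_getElem _ ' ' h0 (by simpa using hlt)]
      simp
    split_ifs with h1 h2 h2 <;> first | rfl | exact absurd (hiff.mp h1) h2 | exact absurd (hiff.mpr h2) h1
  rw [PySem.List.foldl_congr_mem _ _ _ _ hbody]
  rw [PySem.List.foldl_pyRange_zero_pyGetD' t.toList ' '
    (fun num ch => if ch = c then num + 1 else num) 0]
  rw [show (fun (num : Int) ch => if ch = c then num + 1 else num)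
      = (fun (num : Int) ch => if (ch == c) = true then num + 1 else num) from by
    funext n ch; simp]
  rw [PySem.List.foldl_count_if (fun ch => ch == c) t.toList 0]
  simp [List.count]

lemma pvMem_special (c : Char) :
    c ∈ pvSpecial ↔ (c ∈ pvDelimiterList ∨ c ∈ pvMathOperatorList) := by
  have h : ("(), +*/-".toList : List Char) = ['(', ')', ',', ' ', '+', '*', '/', '-'] := rfl
  rw [pvSpecial, h, PySem.Set.mem_ofList]
  simp [pvDelimiterList, pvMathOperatorList]
  tauto

lemma pvCuts_eq (s : String) : pvCuttingIndexes s = pvCutsB s := by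
  unfold pvCuttingIndexes pvCutsB
  have hbody : ∀ (acc : List Int), ∀ i ∈ PySem.List.pyRange 1 (PySem.Str.len s) 1,
      (if PySem.List.pyGetD s.toList i ' ' ∈ pvDelimiterList ∨
          PySem.List.pyGetD s.toList i ' ' ∈ pvMathOperatorList then acc ++ [i]
       else if PySem.List.pyGetD s.toList i ' ' ∉ pvDelimiterList ++ pvMathOperatorList ∧
               PySem.List.pyGetD s.toList (i - 1) ' ' ∈ pvDelimiterList ++ pvMathOperatorList then acc ++ [i]
       else acc)
      = (if (PySem.List.pyGetD s.toList i ' ' ∈ pvSpecial ∨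
             PySem.List.pyGetD s.toList (i - 1) ' ' ∈ pvSpecial) then acc ++ [i] else acc) := by
    intro acc i _
    have e1 := pvMem_special (PySem.List.pyGetD s.toList i ' ')
    have e2 := pvMem_special (PySem.List.pyGetD s.toList (i - 1) ' ')
    split_ifs with p1 p2 q q <;>
      first | rfl | (exfalso; simp [List.mem_append] at *; tauto)
  rw [PySem.List.foldl_congr_mem _ _ _ _ hbody]
  rw [PySem.List.foldl_append_ite_eq_filter
    (fun i => (PySem.List.pyGetD s.toList i ' ' ∈ pvSpecial ∨
               PySem.List.pyGetD s.toList (i - 1) ' ' ∈ pvSpecial))]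

lemma pvCuts_bounds (s : String) : ∀ x ∈ pvCutsB s, 0 ≤ x ∧ x ≤ (s.toList.length : Int) := by
  intro x hx
  unfold pvCutsB at hx
  simp only [List.mem_append, List.mem_filter, List.mem_cons,
    List.not_mem_nil, or_false] at hx
  rcases hx with (h | ⟨hr, _⟩) | h
  · simp [h]
  · have h1 := PySem.List.mem_pyRange_one.mp (by simpa using hr)
    have h2 : s.toList.length = s.length := by simp
    omega
  · rw [h, PySem.Str.len_eq]
    omega

lemma pvCuts_sorted (s : String) : (pvCutsB s).Pairwise (· ≤ ·) := by
  unfold pvCutsB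
  have hlen0 : (0 : Int) ≤ PySem.Str.len s := by
    rw [PySem.Str.len_eq]; positivity
  have hmem : ∀ x ∈ (PySem.List.pyRange 1 (PySem.Str.len s) 1).filter
      (fun i => decide (PySem.List.pyGetD s.toList i ' ' ∈ pvSpecial ∨
                        PySem.List.pyGetD s.toList (i - 1) ' ' ∈ pvSpecial)),
      1 ≤ x ∧ x < PySem.Str.len s := by
    intro x hx
    exact PySem.List.mem_pyRange_one.mp (List.mem_filter.mp hx).1
  apply List.pairwise_append.mpr
  refine ⟨?_, List.pairwise_singleton _ _, ?_⟩
  · apply List.pairwise_append.mpr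
    refine ⟨List.pairwise_singleton _ _,
      ((PySem.List.pairwise_lt_pyRange_one (a := 1) (b := PySem.Str.len s)).filter _).imp (fun h => le_of_lt h), ?_⟩
    intro x hx y hy
    simp only [List.mem_singleton] at hx
    subst hx
    have := hmem y hy
    omega
  · intro x hx y hy
    simp only [List.mem_singleton] at hy
    subst hy
    simp only [List.mem_append, List.mem_singleton] at hx
    rcases hx with h | h
    · omega
    · have := hmem x h
      omega

lemma pvBal_snoc (cs : List Char) (ch : Char) :
    pvBalOf (cs ++ [ch]) = pvBalOf cs + (if ch = '(' then (1 : Int) else 0) - (if ch = ')' then (1 : Int) else 0) := by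
  by_cases h1 : ch = '(' <;> by_cases h2 : ch = ')' <;>
    simp [pvBalOf, List.count_append, h1, h2] <;> omega

lemma pvBalances_aux (cs : List Char) :
    cs.foldl (fun st ch =>
      let b := st.2 + (if ch = '(' then (1 : Int) else 0) - (if ch = ')' then (1 : Int) else 0)
      (st.1 ++ [b], b)) ([(0 : Int)], (0 : Int))
    = ((List.range (cs.length + 1)).map (fun k => pvBalOf (cs.take k)), pvBalOf cs) := by
  induction cs using List.reverseRecOn with
  | nil => simp [pvBalOf]
  | append_singleton cs ch ih =>
    rw [List.foldl_append, ih]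
    simp only [List.foldl_cons, List.foldl_nil]
    rw [Prod.ext_iff]
    refine ⟨?_, (pvBal_snoc cs ch).symm⟩
    rw [← pvBal_snoc cs ch]
    simp only [List.length_append, List.length_cons, List.length_nil]
    conv_rhs => rw [show cs.length + 0 + 1 + 1 = (cs.length + 1) + 1 by ring, List.range_succ, List.map_append]
    congr 1
    · apply List.map_congr_left
      intro k hk
      have hk' : k ≤ cs.length := by
        have := List.mem_range.mp hk; omega
      rw [List.take_append_of_le_length hk']
    · have : (cs ++ [ch]).take (cs.length + 1) = cs ++ [ch] := by
        apply List.take_of_length_le; simp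
      simp [this]

lemma pvBalances_eq (s : String) :
    pvBalances s = (List.range (s.toList.length + 1)).map (fun k => pvBalOf (s.toList.take k)) := by
  unfold pvBalances
  rw [pvBalances_aux]

lemma pvBalances_getD (s : String) (a : Int) (h0 : 0 ≤ a) (hn : a ≤ (s.toList.length : Int)) :
    PySem.List.pyGetD (pvBalances s) a 0 = pvBalOf (s.toList.take a.toNat) := by
  rw [pvBalances_eq]
  rw [PySem.List.pyGetD_eq_getElem _ 0 h0 (by rw [List.length_map, List.length_range]; omega)]
  rw [List.getElem_map, List.getElem_range]

lemma pvCond_equiv (s : String) (a b : Int) (h0 : 0 ≤ a) (hab : a ≤ b)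
    (hbn : b ≤ (s.toList.length : Int)) :
    pvEqualNro (PySem.Str.slice s (some a) (some b))
      = decide (PySem.List.pyGetD (pvBalances s) a 0 = PySem.List.pyGetD (pvBalances s) b 0) := by
  have hb0 : (0 : Int) ≤ b := le_trans h0 hab
  have ht : (PySem.Str.slice s (some a) (some b)).toList
      = (s.toList.drop a.toNat).take (b.toNat - a.toNat) := by
    have hb : (PySem.Str.slice s (some a) (some b)).toList
        = PySem.List.slice s.toList (some a) (some b) := by simp
    rw [hb, PySem.List.slice_toNat _ h0 hb0]
  have htake : s.toList.take b.toNat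
      = s.toList.take a.toNat ++ (s.toList.drop a.toNat).take (b.toNat - a.toNat) := by
    rw [show b.toNat = a.toNat + (b.toNat - a.toNat) by omega, List.take_add]
    congr 2
    omega
  have h1 := congrArg (List.count '(') htake
  have h2 := congrArg (List.count ')') htake
  rw [List.count_append] at h1 h2
  have hX : (pvCount "(" (PySem.Str.slice s (some a) (some b))
      = pvCount ")" (PySem.Str.slice s (some a) (some b)))
      ↔ (PySem.List.pyGetD (pvBalances s) a 0 = PySem.List.pyGetD (pvBalances s) b 0) := by
    rw [pvCount_char '(' "(" rfl, pvCount_char ')' ")" rfl,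
      pvBalances_getD s a h0 (by omega), pvBalances_getD s b hb0 hbn, ht]
    unfold pvBalOf
    constructor <;> intro h <;> omega
  simp only [pvEqualNro]
  by_cases h : pvCount "(" (PySem.Str.slice s (some a) (some b))
      = pvCount ")" (PySem.Str.slice s (some a) (some b))
  · simp [h, hX.mp h]
  · have hy : ¬ (PySem.List.pyGetD (pvBalances s) a 0 = PySem.List.pyGetD (pvBalances s) b 0) :=
      fun hy => h (hX.mpr hy)
    simp [h, hy]

lemma pvFilterMap_if {α β : Type} (p : α → Prop) [DecidablePred p] (f : α → β) :
    ∀ l : List α, l.filterMap (fun c => if p c then some (f c) else none)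
      = (l.filter (fun c => decide (p c))).map f
  | [] => rfl
  | c :: cs => by
    by_cases h : p c <;>
      simp [h, pvFilterMap_if p f cs]

lemma pvA_pairs_nat (P : Int → Int → Bool) (ci : List Int) (init : List (List Int)) :
    (List.range ci.length).foldl (fun pairs k =>
      pairs ++ ((ci.drop (k + 1)).filter (fun c => P (ci.getD k 0) c)).map
        (fun c => [ci.getD k 0, c])) init = init ++ pvPairsOf P ci := by
  induction ci generalizing init with
  | nil => simp [pvPairsOf]
  | cons a rest ih =>
    simp only [List.length_cons, List.range_succ_eq_map, List.foldl_cons, List.foldl_map]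
    rw [show (∀ init', (List.range rest.length).foldl (fun pairs k =>
        pairs ++ (((a :: rest).drop (k.succ + 1)).filter (fun c => P ((a :: rest).getD k.succ 0) c)).map
          (fun c => [(a :: rest).getD k.succ 0, c])) init' = init' ++ pvPairsOf P rest) from
      fun init' => by simpa using ih init']
    simp [pvPairsOf]

lemma pvA_pairs (P : Int → Int → Bool) (ci : List Int) :
    (PySem.List.pyRange 0 ((ci.length : Int) - 1) 1).foldl (fun pairs i =>
      (PySem.List.pyRange (i + 1) (ci.length : Int) 1).foldl (fun pairs j =>
        if P (PySem.List.pyGetD ci i 0) (PySem.List.pyGetD ci j 0)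
        then pairs ++ [[PySem.List.pyGetD ci i 0, PySem.List.pyGetD ci j 0]]
        else pairs) pairs) [] = pvPairsOf P ci := by
  rcases ci with _ | ⟨a, rest⟩
  · simp [PySem.List.pyRange_one_eq_nil, pvPairsOf]
  · set ci := a :: rest with hci
    have hlen : 1 ≤ (ci.length : Int) := by simp [hci]
    -- extend the outer range from [0, n-1) to [0, n): the extra i = n-1 step has an empty inner range
    have hext : (PySem.List.pyRange 0 ((ci.length : Int) - 1) 1).foldl (fun pairs i =>
        (PySem.List.pyRange (i + 1) (ci.length : Int) 1).foldl (fun pairs j =>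
          if P (PySem.List.pyGetD ci i 0) (PySem.List.pyGetD ci j 0)
          then pairs ++ [[PySem.List.pyGetD ci i 0, PySem.List.pyGetD ci j 0]]
          else pairs) pairs) ([] : List (List Int))
      = (PySem.List.pyRange 0 ((ci.length : Int)) 1).foldl (fun pairs i =>
        (PySem.List.pyRange (i + 1) (ci.length : Int) 1).foldl (fun pairs j =>
          if P (PySem.List.pyGetD ci i 0) (PySem.List.pyGetD ci j 0)
          then pairs ++ [[PySem.List.pyGetD ci i 0, PySem.List.pyGetD ci j 0]]
          else pairs) pairs) ([] : List (List Int)) := by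
      rw [show ((ci.length : Int)) = ((ci.length : Int) - 1) + 1 by ring]
      rw [PySem.List.pyRange_one_succ_right (by omega)]
      rw [List.foldl_append]
      simp only [List.foldl_cons, List.foldl_nil]
      rw [show ((ci.length : Int) - 1 + 1) = (ci.length : Int) by ring]
      rw [PySem.List.pyRange_one_eq_nil (le_refl _)]
      rfl
    rw [hext, PySem.List.pyRange_zero_nat, List.foldl_map]
    have hbody : ∀ (pairs : List (List Int)) (k : Nat), k ∈ List.range ci.length →
        (PySem.List.pyRange ((k : Int) + 1) (ci.length : Int) 1).foldl (fun pairs j =>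
          if P (PySem.List.pyGetD ci (k : Int) 0) (PySem.List.pyGetD ci j 0)
          then pairs ++ [[PySem.List.pyGetD ci (k : Int) 0, PySem.List.pyGetD ci j 0]]
          else pairs) pairs
        = pairs ++ ((ci.drop (k + 1)).filter (fun c => P (ci.getD k 0) c)).map
            (fun c => [ci.getD k 0, c]) := by
      intro pairs k _
      have h1 : ((k : Int) + 1) = ((k + 1 : Nat) : Int) := by push_cast; ring
      have hg : PySem.List.pyGetD ci (k : Int) 0 = ci.getD k 0 := PySem.List.pyGetD_natCast ci k 0
      rw [h1, hg]
      have := PySem.List.foldl_pyRange_pyGetD' ci (0 : Int)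
        (fun pairs c => if P (ci.getD k 0) c then pairs ++ [[ci.getD k 0, c]] else pairs) pairs
        (a := ((k + 1 : Nat) : Int)) (by positivity)
      rw [this]
      simp only [Int.toNat_natCast]
      exact PySem.List.foldl_append_if (fun c => P (ci.getD k 0) c) (fun c => [ci.getD k 0, c]) _ _
    exact Eq.trans (PySem.List.foldl_congr_mem _ _ _ _ hbody) (pvA_pairs_nat P ci [])

lemma pvPairs_eq (cuts bal : List Int) :
    pvPairs cuts bal
      = pvPairsOf (fun a c => decide (PySem.List.pyGetD bal a 0 = PySem.List.pyGetD bal c 0)) cuts := by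
  induction cuts with
  | nil => rfl
  | cons a rest ih =>
    simp only [pvPairs, pvPairsOf, ih,
      pvFilterMap_if (fun c => PySem.List.pyGetD bal a 0 = PySem.List.pyGetD bal c 0) (fun c => [a, c]) rest]

lemma pvPairsOf_congr (R : Int → Int → Prop) (P Q : Int → Int → Bool)
    (h : ∀ a b, R a b → P a b = Q a b) :
    ∀ cuts : List Int, cuts.Pairwise R → pvPairsOf P cuts = pvPairsOf Q cuts := by
  intro cuts hp
  induction cuts with
  | nil => rfl
  | cons a rest ih =>
    rcases List.pairwise_cons.mp hp with ⟨hhead, htail⟩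
    simp only [pvPairsOf, ih htail]
    congr 1
    apply congrArg
    exact List.filter_congr (fun c hc => h a c (hhead c hc))

-- ===== VERDICT (by name: the statement is the Claim_ definition above) =====
theorem potential_cutting_pair_indexes_spec : Claim_equal_potential_cutting_pair_indexes := by
  intro string _
  unfold Spec_potential_cutting_pair_indexes potential_cutting_pair_indexes potential_cutting_pair_indexes_alt
  rw [pvCuts_eq]
  rw [pvA_pairs (fun a b => pvEqualNro (PySem.Str.slice string (some a) (some b))) (pvCutsB string)]
  rw [pvPairs_eq]
  refine pvPairsOf_congr (fun a b => 0 ≤ a ∧ a ≤ b ∧ b ≤ (string.toList.length : Int)) _ _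
    (fun a b hr => pvCond_equiv string a b hr.1 hr.2.1 hr.2.2) (pvCutsB string) ?_
  have hb := pvCuts_bounds string
  refine (pvCuts_sorted string).imp_of_mem ?_
  intro a b ha hbmem hle
  exact ⟨(hb a ha).1, hle, (hb b hbmem).2⟩
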